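-- pv_equiv track=rewrite | github.com/nasoulic/multidisciplinary_aircraft_design | acsizing/find_intersection.py | sum_values_up_to_key
-- ===== SOURCE A (Python) =====
-- def sum_values_up_to_key(input_dict, key):
--     total = 0
--     for k, v in input_dict.items():
--         if k == key:
--             total += v
--             break  # Stop when you reach the specified key
--         total += v
--     return total
-- ===== SOURCE B (Python) =====
-- def sum_values_up_to_key(input_dict, key):
--     keys = list(input_dict)
--     values = list(input_dict.values())
--     cutoff = keys.index(key) + 1 if key in input_dict else len(values)
--     return sum(values[:cutoff])
-- ===== Notes on version B (the rewrite author's own statement) =====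
-- stated objective: alternative
-- what changed: Replaces the accumulate-and-break loop with locating the key's index and summing the prefix slice of the materialized value list (key absent: sum everything, as in A).
import Mathlib
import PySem

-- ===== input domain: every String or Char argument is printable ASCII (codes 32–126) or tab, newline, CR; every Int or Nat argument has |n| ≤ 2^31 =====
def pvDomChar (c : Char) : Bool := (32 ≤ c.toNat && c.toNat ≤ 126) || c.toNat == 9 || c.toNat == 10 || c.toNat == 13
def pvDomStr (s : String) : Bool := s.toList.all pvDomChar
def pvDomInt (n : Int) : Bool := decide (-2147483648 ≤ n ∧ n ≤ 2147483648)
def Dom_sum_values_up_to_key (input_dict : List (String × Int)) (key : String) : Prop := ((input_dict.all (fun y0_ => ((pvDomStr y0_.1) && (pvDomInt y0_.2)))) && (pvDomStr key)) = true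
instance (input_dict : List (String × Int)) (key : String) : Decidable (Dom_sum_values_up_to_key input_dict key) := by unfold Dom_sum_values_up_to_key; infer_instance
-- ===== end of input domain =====

-- B: locates the key's index and sums a prefix slice instead of A's accumulate-and-break loop; same value everywhere.
-- ===== PORT A =====
-- the for-loop with break, as structural recursion over the items with the accumulator `total`
def sumA_loop (key : String) : List (String × Int) → Int → Int
  | [], total => total
  | (k, v) :: rest, total =>
      if k == key then total + v else sumA_loop key rest (total + v)

def sum_values_up_to_key (input_dict : List (String × Int)) (key : String) : Int :=
  sumA_loop key input_dict 0

-- ===== PORT B =====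
def sum_values_up_to_key_alt (input_dict : List (String × Int)) (key : String) : Int :=
  let keys := input_dict.map Prod.fst
  let values := input_dict.map Prod.snd
  let cutoff : Nat :=
    match PySem.List.index? keys key with
    | some i => i + 1
    | none => values.length
  (values.take cutoff).sum

-- ===== PRECONDITION & SPEC =====
def Spec_sum_values_up_to_key (input_dict : List (String × Int)) (key : String) (out : Int) : Prop := out = sum_values_up_to_key_alt input_dict key
instance (input_dict : List (String × Int)) (key : String) (out : Int) : Decidable (Spec_sum_values_up_to_key input_dict key out) := by unfold Spec_sum_values_up_to_key; infer_instance

-- ===== CLAIM (what is proved, stated in full; the proofs are below) =====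
def Claim_equal_sum_values_up_to_key : Prop := ∀ (input_dict : List (String × Int)) (key : String), Dom_sum_values_up_to_key input_dict key → Spec_sum_values_up_to_key input_dict key (sum_values_up_to_key input_dict key)

-- ===== LEMMAS AND PROOFS =====

-- ===== VERDICT (by name: the statement is the Claim_ definition above) =====
theorem alt_cons (k key : String) (v : Int) (rest : List (String × Int)) :
    sum_values_up_to_key_alt ((k, v) :: rest) key =
      if k = key then v else v + sum_values_up_to_key_alt rest key := by
  by_cases h : k = key
  · simp only [sum_values_up_to_key_alt, List.map_cons, h, PySem.List.index?_cons_self,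
      List.take_succ_cons, List.take_zero, if_true]
    simp
  · simp only [sum_values_up_to_key_alt, List.map_cons,
      PySem.List.index?_cons_of_ne _ h, h, if_false]
    cases hi : PySem.List.index? (rest.map Prod.fst) key <;>
      simp [List.take_succ_cons, List.take_of_length_le]

theorem loop_eq (key : String) (l : List (String × Int)) (acc : Int) :
    sumA_loop key l acc = acc + sum_values_up_to_key_alt l key := by
  induction l generalizing acc with
  | nil => simp [sumA_loop, sum_values_up_to_key_alt]
  | cons p rest ih =>
    obtain ⟨k, v⟩ := p
    rw [alt_cons]
    by_cases h : k = key <;> simp [sumA_loop, h, ih] <;> ring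

theorem sum_values_up_to_key_spec : Claim_equal_sum_values_up_to_key := by
  intro d key _
  unfold Spec_sum_values_up_to_key sum_values_up_to_key
  simpa using loop_eq key d 0
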